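-- pv_equiv track=rewrite | github.com/pypi-data/pypi-mirror-271 | packages/Mbtiler/Mbtiler-2.5.1-py3-none-any.whl/Mbtiler/proj.py | QuadKeyToTileXY
-- ===== SOURCE A (Python) =====
-- def QuadKeyToTileXY(quadKey):
-- 	tileX = tileY = 0
-- 	levelOfDetail = len(quadKey)
-- 	for i in range(levelOfDetail,0,-1):
-- 		mask = 1 << (i-1)
-- 		# if quadKey[levelOfDetail - i] == '0':
-- 		# 	break
-- 		if quadKey[levelOfDetail - i] == '1':
-- 			tileX |= mask
-- 		elif quadKey[levelOfDetail - i] == '2':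
-- 			tileY |= mask
-- 		elif quadKey[levelOfDetail - i] == '3':
-- 			tileX |= mask
-- 			tileY |= mask
-- 		elif quadKey[levelOfDetail - i] != '0':
-- 			raise Exception('Invalid QuadKey digit sequence.')
-- 	return tileX, tileY
-- ===== SOURCE B (Python) =====
-- def QuadKeyToTileXY(quadKey):
-- 	tileX = tileY = 0
-- 	for c in quadKey:
-- 		if c not in '0123':
-- 			raise Exception('Invalid QuadKey digit sequence.')
-- 		tileX = tileX * 2 + (1 if c in '13' else 0)
-- 		tileY = tileY * 2 + (1 if c in '23' else 0)
-- 	return tileX, tileY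
-- ===== Notes on version B (the rewrite author's own statement) =====
-- stated objective: simpler
-- what changed: Replaces the reverse-indexed loop with positional bitmasks (1 << (i-1), quadKey[len-i], |=) by a direct left-to-right pass over the characters maintaining tileX/tileY as shift-accumulators (acc = acc*2 + bit), dropping all index and mask bookkeeping.
import Mathlib
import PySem

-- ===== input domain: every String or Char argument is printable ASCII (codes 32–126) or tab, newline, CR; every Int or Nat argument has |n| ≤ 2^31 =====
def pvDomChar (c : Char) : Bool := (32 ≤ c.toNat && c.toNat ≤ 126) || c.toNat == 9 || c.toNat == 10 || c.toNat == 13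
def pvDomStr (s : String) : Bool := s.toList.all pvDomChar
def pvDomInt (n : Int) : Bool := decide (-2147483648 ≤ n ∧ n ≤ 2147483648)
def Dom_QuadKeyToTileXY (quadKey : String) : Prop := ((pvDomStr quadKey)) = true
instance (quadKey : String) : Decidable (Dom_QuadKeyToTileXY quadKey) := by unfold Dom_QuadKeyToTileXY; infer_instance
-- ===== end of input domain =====

-- B replaces A's reverse-indexed bitmask loop by a left-to-right shift-accumulator pass (simpler).

-- ===== PORT A =====
-- one iteration of A's 'for i in range(levelOfDetail, 0, -1)' body; none = the raise.
-- In the loop i ≥ 1, so (i - 1).toNat is exact for Python's 1 << (i - 1).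
def pvStepA (cs : List Char) (L : Int) (st : Option (Int × Int)) (i : Int) : Option (Int × Int) :=
  match st with
  | none => none
  | some (tileX, tileY) =>
    let mask : Int := (1 : Int) <<< (i - 1).toNat
    match PySem.List.pyGet? cs (L - i) with   -- quadKey[levelOfDetail - i]
    | none => none
    | some c =>
      if c = '1' then some (PySem.Int.bor tileX mask, tileY)
      else if c = '2' then some (tileX, PySem.Int.bor tileY mask)
      else if c = '3' then some (PySem.Int.bor tileX mask, PySem.Int.bor tileY mask)
      else if c ≠ '0' then none
      else some (tileX, tileY)

-- levelOfDetail = len(quadKey), written inline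
def QuadKeyToTileXY (quadKey : String) : Int × Int :=
  ((PySem.List.pyRange (quadKey.toList.length : Int) 0 (-1)).foldl
    (pvStepA quadKey.toList (quadKey.toList.length : Int)) (some (0, 0))).getD (0, 0)

-- ===== PORT B =====
-- one iteration of B's 'for c in quadKey' body; none = the raise.
def pvStepB (st : Option (Int × Int)) (c : Char) : Option (Int × Int) :=
  match st with
  | none => none
  | some (tileX, tileY) =>
    if c = '0' ∨ c = '1' ∨ c = '2' ∨ c = '3' then
      some (tileX * 2 + (if c = '1' ∨ c = '3' then 1 else 0),
            tileY * 2 + (if c = '2' ∨ c = '3' then 1 else 0))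
    else none

def QuadKeyToTileXY_alt (quadKey : String) : Int × Int :=
  (quadKey.toList.foldl pvStepB (some (0, 0))).getD (0, 0)

-- ===== PRECONDITION & SPEC =====
-- Pre_ excludes exactly the strings containing a character other than the digits 0,1,2,3, on which Python A raises Exception.
def Pre_QuadKeyToTileXY (quadKey : String) : Prop :=
  quadKey.toList.all (fun c => c == '0' || c == '1' || c == '2' || c == '3') = true
instance (quadKey : String) : Decidable (Pre_QuadKeyToTileXY quadKey) := by unfold Pre_QuadKeyToTileXY; infer_instance
def pvWitness_QuadKeyToTileXY : String := "310"

def Spec_QuadKeyToTileXY (quadKey : String) (out : Int × Int) : Prop := out = QuadKeyToTileXY_alt quadKey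
instance (quadKey : String) (out : Int × Int) : Decidable (Spec_QuadKeyToTileXY quadKey out) := by unfold Spec_QuadKeyToTileXY; infer_instance

-- ===== CLAIM (what is proved, stated in full; the proofs are below) =====
def Claim_equal_QuadKeyToTileXY : Prop := ∀ (quadKey : String), Dom_QuadKeyToTileXY quadKey → Pre_QuadKeyToTileXY quadKey → Spec_QuadKeyToTileXY quadKey (QuadKeyToTileXY quadKey)

-- ===== LEMMAS AND PROOFS =====

theorem pvFoldA_none (cs : List Char) (L : Int) (l : List Int) :
    l.foldl (pvStepA cs L) none = none := by
  induction l with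
  | nil => rfl
  | cons i l ih =>
    rw [List.foldl_cons, show pvStepA cs L none i = none from rfl]; exact ih

theorem pvFoldB_none (l : List Char) : l.foldl pvStepB none = none := by
  induction l with
  | nil => rfl
  | cons c l ih =>
    rw [List.foldl_cons, show pvStepB none c = none from rfl]; exact ih

-- OR of an even multiple of 2^L with the single bit 2^L is addition.
theorem pvBor_shift (x : Int) (hx : 0 ≤ x) (L : Nat) :
    PySem.Int.bor (x * 2 * 2 ^ L) ((1 : Int) <<< L) = (x * 2 + 1) * 2 ^ L := by
  obtain ⟨m, rfl⟩ := Int.eq_ofNat_of_zero_le hx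
  have hk : (2 : Nat) ^ L < 2 ^ (L + 1) := Nat.pow_lt_pow_right (by omega) (by omega)
  have h1 : ((1 : Int) <<< L) = ((2 ^ L : Nat) : Int) := by
    rw [Int.shiftLeft_eq]; push_cast; ring
  have h2 : ((m : Int) * 2 * 2 ^ L) = ((m * 2 ^ (L + 1) : Nat) : Int) := by push_cast; ring
  rw [h1, h2, PySem.Int.bor_natCast]
  have h3 : m * 2 ^ (L + 1) ||| 2 ^ L = m * 2 ^ (L + 1) + 2 ^ L := by
    have := (Nat.shiftLeft_add_eq_or_of_lt hk m).symm
    simpa [Nat.shiftLeft_eq] using this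
  rw [h3]; push_cast; ring

-- dropping the head character shifts A's index arithmetic by one.
theorem pvStepA_cons (c : Char) (cs : List Char) (i : Int)
    (hi : 0 < i ∧ i ≤ (cs.length : Int)) (st : Option (Int × Int)) :
    pvStepA (c :: cs) ((cs.length : Int) + 1) st i = pvStepA cs (cs.length : Int) st i := by
  have hget : PySem.List.pyGet? (c :: cs) ((cs.length : Int) + 1 - i)
      = PySem.List.pyGet? cs ((cs.length : Int) - i) := by
    rw [show (cs.length : Int) + 1 - i = ((((cs.length : Int) - i).toNat + 1 : Nat) : Int) by omega,
      show (cs.length : Int) - i = ((((cs.length : Int) - i).toNat : Nat) : Int) by omega,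
      PySem.List.pyGet?_natCast, PySem.List.pyGet?_natCast, List.getElem?_cons_succ, Int.toNat_natCast]
  cases st with
  | none => rfl
  | some p =>
    simp only [pvStepA, hget]

-- main invariant: A's countdown-mask fold from shifted accumulators equals B's fold.
theorem pvMain (cs : List Char) : ∀ (x y : Int), 0 ≤ x → 0 ≤ y →
    (PySem.List.pyRange (cs.length : Int) 0 (-1)).foldl (pvStepA cs (cs.length : Int))
      (some (x * 2 ^ cs.length, y * 2 ^ cs.length))
    = cs.foldl pvStepB (some (x, y)) := by
  induction cs with
  | nil =>
    intro x y _ _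
    rw [show ((List.length ([] : List Char) : Int)) = 0 by simp,
      PySem.List.pyRange_neg_one_eq_nil le_rfl]
    simp only [List.foldl_nil, List.length_nil, pow_zero, mul_one]
  | cons c cs ih =>
    intro x y hx hy
    have hlen : ((c :: cs).length : Int) = (cs.length : Int) + 1 := by
      push_cast [List.length_cons]; ring
    rw [hlen, PySem.List.pyRange_neg_one_cons (by positivity), List.foldl_cons]
    rw [show (cs.length : Int) + 1 - 1 = (cs.length : Int) by ring]
    have hfirst : pvStepA (c :: cs) ((cs.length : Int) + 1)
        (some (x * 2 ^ (c :: cs).length, y * 2 ^ (c :: cs).length)) ((cs.length : Int) + 1)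
        = (pvStepB (some (x, y)) c).map
            (fun p => (p.1 * 2 ^ cs.length, p.2 * 2 ^ cs.length)) := by
      have hidx : (cs.length : Int) + 1 - ((cs.length : Int) + 1) = ((0 : Nat) : Int) := by omega
      have hmask : ((cs.length : Int) + 1 - 1).toNat = cs.length := by omega
      have ex : x * 2 ^ (c :: cs).length = x * 2 * 2 ^ cs.length := by
        rw [List.length_cons]; ring
      have ey : y * 2 ^ (c :: cs).length = y * 2 * 2 ^ cs.length := by
        rw [List.length_cons]; ring
      rw [ex, ey]
      simp only [pvStepA, hidx, hmask, PySem.List.pyGet?_natCast, List.getElem?_cons_zero,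
        pvStepB]
      by_cases h1 : c = '1'
      · simp [h1, pvBor_shift x hx]
      by_cases h2 : c = '2'
      · simp [h2, pvBor_shift y hy]
      by_cases h3 : c = '3'
      · simp [h3, pvBor_shift x hx, pvBor_shift y hy]
      by_cases h0 : c = '0'
      · simp [h0]
      · simp [h1, h2, h3, h0]
    rw [PySem.List.foldl_congr_mem _ _ (pvStepA cs (cs.length : Int)) _
      (fun st i hi => pvStepA_cons c cs i (PySem.List.mem_pyRange_neg_one.mp hi) st)]
    rw [hfirst]
    cases hB : pvStepB (some (x, y)) c with
    | none =>
      rw [List.foldl_cons, hB]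
      simp [pvFoldA_none, pvFoldB_none]
    | some p =>
      obtain ⟨x', y'⟩ := p
      have hx' : 0 ≤ x' ∧ 0 ≤ y' := by
        simp only [pvStepB] at hB
        split_ifs at hB <;> (simp only [Option.some_inj, Prod.mk.injEq] at hB; omega)
      rw [List.foldl_cons, hB, Option.map_some]
      exact ih x' y' hx'.1 hx'.2

-- ===== VERDICT (by name: the statement is the Claim_ definition above) =====
theorem QuadKeyToTileXY_spec : Claim_equal_QuadKeyToTileXY := by
  intro quadKey _ _
  unfold Spec_QuadKeyToTileXY QuadKeyToTileXY QuadKeyToTileXY_alt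
  have h := pvMain quadKey.toList 0 0 le_rfl le_rfl
  simp only [zero_mul] at h
  rw [h]
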